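-- pv_equiv track=rewrite | github.com/divake/temporal-uncertainty | metadata/analysis_code/analyze_mot17_dataset.py | find_contiguous_segments
-- ===== SOURCE A (Python) =====
-- from typing import Dict, List, Tuple
--
-- def find_contiguous_segments(frames: List[int], min_length: int = 20) -> List[Tuple[int, int]]:
--     """
--     Find contiguous segments in a list of frame numbers.
--
--     Args:
--         frames: List of frame numbers (sorted)
--         min_length: Minimum segment length
--
--     Returns:
--         List of (start, end) tuples
--     """
--     if not frames:
--         return []
--
--     frames = sorted(frames)
--     segments = []
--     start = frames[0]
--     prev = frames[0]
--
--     for frame in frames[1:]: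
--         if frame != prev + 1:
--             # Gap detected, end current segment
--             if prev - start + 1 >= min_length:
--                 segments.append((start, prev))
--             start = frame
--         prev = frame
--
--     # Handle last segment
--     if prev - start + 1 >= min_length:
--         segments.append((start, prev))
--
--     return segments
-- ===== SOURCE B (Python) =====
-- def find_contiguous_segments(frames, min_length=20):
--     """Staged gap-pair decomposition: compute the gap pairs once, derive the
--     starts and ends lists from them, then zip and filter by length."""
--     fs = sorted(frames)
--     if not fs:
--         return []
--     gaps = [(a, b) for a, b in zip(fs, fs[1:]) if b != a + 1]
--     starts = [fs[0]] + [b for _, b in gaps]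
--     ends = [a for a, _ in gaps] + [fs[-1]]
--     return [(s, e) for s, e in zip(starts, ends) if e - s + 1 >= min_length]
-- ===== Notes on version B (the rewrite author's own statement) =====
-- stated objective: alternative
-- what changed: Replaces A's carried start/prev state machine (emit-on-gap inside the loop plus duplicated final-segment handling) by a staged declarative pipeline: compute the list of gap pairs from zip(fs, fs[1:]) once, derive the starts list (first element plus each gap's right member) and the ends list (each gap's left member plus the last element), then zip them and filter by length.
import Mathlib
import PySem

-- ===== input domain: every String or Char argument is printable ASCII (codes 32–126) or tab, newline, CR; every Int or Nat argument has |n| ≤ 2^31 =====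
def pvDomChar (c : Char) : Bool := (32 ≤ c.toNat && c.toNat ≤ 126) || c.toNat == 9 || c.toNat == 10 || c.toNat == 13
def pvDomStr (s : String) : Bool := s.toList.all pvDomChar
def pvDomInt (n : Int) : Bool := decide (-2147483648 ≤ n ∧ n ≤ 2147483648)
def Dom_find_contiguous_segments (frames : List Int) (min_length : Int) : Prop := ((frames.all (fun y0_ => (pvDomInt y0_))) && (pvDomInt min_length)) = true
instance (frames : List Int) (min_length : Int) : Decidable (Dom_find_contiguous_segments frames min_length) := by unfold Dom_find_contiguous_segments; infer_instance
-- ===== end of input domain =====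

-- B replaces A's carried start/prev state machine by a staged pipeline: gap pairs from
-- zip(fs, fs[1:]) once, starts/ends lists derived from them, zipped and filtered; same cost.


-- ===== PORT A =====
-- Transliteration of A: early return on empty, sort, then a fold over fs[1:] carrying
-- (segments, start, prev), plus the final-segment emit after the loop.
def find_contiguous_segments (frames : List Int) (min_length : Int) : List (Int × Int) :=
  match frames with
  | [] => []
  | _ =>
    match PySem.List.sorted frames (fun x => x) false with
    | [] => []  -- unreachable: sorting a nonempty list is nonempty
    | f0 :: rest =>
      let st := rest.foldl
        (fun (s : List (Int × Int) × Int × Int) frame =>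
          let segs := s.1
          let start := s.2.1
          let prev := s.2.2
          if frame ≠ prev + 1 then
            ((if prev - start + 1 ≥ min_length then segs ++ [(start, prev)] else segs), frame, frame)
          else
            (segs, start, frame))
        ([], f0, f0)
      if st.2.2 - st.2.1 + 1 ≥ min_length then st.1 ++ [(st.2.1, st.2.2)] else st.1

-- ===== PORT B =====
-- Transliteration of Source B: sort; gap pairs from zip(fs, fs[1:]); starts = fs[0] plus the
-- right members of the gaps; ends = the left members plus fs[-1] (rest.getLastD f0 = fs[-1]);
-- zip starts with ends and keep the long-enough pairs.
def find_contiguous_segments_alt (frames : List Int) (min_length : Int) : List (Int × Int) :=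
  match PySem.List.sorted frames (fun x => x) false with
  | [] => []
  | f0 :: rest =>
    let gaps := ((f0 :: rest).zip rest).filter (fun p => p.2 ≠ p.1 + 1)
    let starts := f0 :: gaps.map Prod.snd
    let ends := gaps.map Prod.fst ++ [rest.getLastD f0]
    (starts.zip ends).filter (fun p => p.2 - p.1 + 1 ≥ min_length)

-- ===== PRECONDITION & SPEC =====
def Spec_find_contiguous_segments (frames : List Int) (min_length : Int) (out : List (Int × Int)) : Prop := out = find_contiguous_segments_alt frames min_length
instance (frames : List Int) (min_length : Int) (out : List (Int × Int)) : Decidable (Spec_find_contiguous_segments frames min_length out) := by unfold Spec_find_contiguous_segments; infer_instance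

-- ===== CLAIM (what is proved, stated in full; the proofs are below) =====
def Claim_equal_find_contiguous_segments : Prop := ∀ (frames : List Int) (min_length : Int), Dom_find_contiguous_segments frames min_length → Spec_find_contiguous_segments frames min_length (find_contiguous_segments frames min_length)

-- ===== LEMMAS AND PROOFS =====

-- intermediate run-splitting description, used only by the proofs:
-- pvRun prev xs consumes the maximal consecutive run continuing prev, returning (run end, rest)
def pvRun (prev : Int) : List Int → Int × List Int
  | [] => (prev, [])
  | x :: xs => if x = prev + 1 then pvRun x xs else (prev, x :: xs)

theorem pvRun_len (prev : Int) (xs : List Int) : (pvRun prev xs).2.length ≤ xs.length := by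
  induction xs generalizing prev with
  | nil => simp [pvRun]
  | cons x xs ih =>
    simp only [pvRun]
    split
    · exact Nat.le_trans (ih x) (Nat.le_succ _)
    · simp

-- run-splitting segment list (proof-side common form of both ports)
def pvSegs (min_length : Int) : List Int → List (Int × Int)
  | [] => []
  | x :: xs =>
    let r := pvRun x xs
    (if r.1 - x + 1 ≥ min_length then [(x, r.1)] else []) ++ pvSegs min_length r.2
termination_by fs => fs.length
decreasing_by
  simpa using Nat.lt_succ_of_le (pvRun_len x xs)

-- A's loop body, named for the proofs
def aStep (min_length : Int) (s : List (Int × Int) × Int × Int) (frame : Int) :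
    List (Int × Int) × Int × Int :=
  if frame ≠ s.2.2 + 1 then
    ((if s.2.2 - s.2.1 + 1 ≥ min_length then s.1 ++ [(s.2.1, s.2.2)] else s.1), frame, frame)
  else
    (s.1, s.2.1, frame)

-- A's fold-plus-final-emit, starting from an empty accumulator
def aRun (min_length start prev : Int) (xs : List Int) : List (Int × Int) :=
  let st := xs.foldl (aStep min_length) ([], start, prev)
  if st.2.2 - st.2.1 + 1 ≥ min_length then st.1 ++ [(st.2.1, st.2.2)] else st.1

theorem foldl_aStep_acc (min_length : Int) (xs : List Int) (segs : List (Int × Int))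
    (start prev : Int) :
    xs.foldl (aStep min_length) (segs, start, prev)
      = (segs ++ (xs.foldl (aStep min_length) ([], start, prev)).1,
         (xs.foldl (aStep min_length) ([], start, prev)).2) := by
  induction xs generalizing segs start prev with
  | nil => simp
  | cons x xs ih =>
    simp only [List.foldl_cons, aStep]
    split
    · split
      · rw [ih, ih (segs := _ ++ [_])]; simp
      · rw [ih]
    · rw [ih]

theorem aRun_eq_pvSegs (min_length : Int) (xs : List Int) (start prev : Int) :
    aRun min_length start prev xs
      = (if (pvRun prev xs).1 - start + 1 ≥ min_length then [(start, (pvRun prev xs).1)] else [])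
        ++ pvSegs min_length (pvRun prev xs).2 := by
  induction xs generalizing start prev with
  | nil => simp [aRun, pvRun, pvSegs]
  | cons x xs ih =>
    by_cases h : x = prev + 1
    · have hs : pvRun prev (x :: xs) = pvRun x xs := by simp [pvRun, h]
      have hl : aRun min_length start prev (x :: xs) = aRun min_length start x xs := by
        simp [aRun, aStep, h]
      rw [hl, hs, ih]
    · have hs : pvRun prev (x :: xs) = (prev, x :: xs) := by simp [pvRun, h]
      have hl : aRun min_length start prev (x :: xs)
          = (if prev - start + 1 ≥ min_length then [(start, prev)] else [])
            ++ aRun min_length x x xs := by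
        simp only [aRun, List.foldl_cons, aStep, if_pos h]
        split
        · rw [foldl_aStep_acc]
          by_cases hf : ((xs.foldl (aStep min_length) ([], x, x)).2.2
              - (xs.foldl (aStep min_length) ([], x, x)).2.1 + 1 ≥ min_length) <;>
            simp [hf]
        · rw [foldl_aStep_acc]
          by_cases hf : ((xs.foldl (aStep min_length) ([], x, x)).2.2
              - (xs.foldl (aStep min_length) ([], x, x)).2.1 + 1 ≥ min_length) <;>
            simp [hf]
      rw [hl, hs, ih]
      simp [pvSegs]

-- B-side: the gap pairs of x :: xs, as B computes them
def gapsL (x : Int) (xs : List Int) : List (Int × Int) :=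
  ((x :: xs).zip xs).filter (fun p => p.2 ≠ p.1 + 1)

theorem gapsL_run (xs : List Int) (x : Int) :
    gapsL x xs = match (pvRun x xs).2 with
      | [] => []
      | y :: ys => ((pvRun x xs).1, y) :: gapsL y ys := by
  induction xs generalizing x with
  | nil => simp [gapsL, pvRun]
  | cons y ys ih =>
    by_cases h : y = x + 1
    · have h1 : gapsL x (y :: ys) = gapsL y ys := by simp [gapsL, h]
      rw [h1, ih, show pvRun x (y :: ys) = pvRun y ys from by simp [pvRun, h]]
    · have h1 : gapsL x (y :: ys) = (x, y) :: gapsL y ys := by simp [gapsL, h]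
      rw [h1, show pvRun x (y :: ys) = (x, y :: ys) from by simp [pvRun, h]]

theorem getLastD_run (xs : List Int) (x : Int) :
    xs.getLastD x = match (pvRun x xs).2 with
      | [] => (pvRun x xs).1
      | y :: ys => ys.getLastD y := by
  induction xs generalizing x with
  | nil => simp [pvRun]
  | cons y ys ih =>
    by_cases h : y = x + 1
    · rw [List.getLastD_cons, ih y, show pvRun x (y :: ys) = pvRun y ys from by simp [pvRun, h]]
    · rw [show pvRun x (y :: ys) = (x, y :: ys) from by simp [pvRun, h]]
      exact List.getLastD_cons

-- B's segment list on a nonempty sorted list, named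
def bSegs (min_length x : Int) (xs : List Int) : List (Int × Int) :=
  ((x :: (gapsL x xs).map Prod.snd).zip ((gapsL x xs).map Prod.fst ++ [xs.getLastD x])).filter
    (fun p => p.2 - p.1 + 1 ≥ min_length)

theorem bSegs_eq_pvSegs (min_length : Int) :
    ∀ (n : Nat) (xs : List Int) (x : Int), xs.length ≤ n →
      bSegs min_length x xs = pvSegs min_length (x :: xs) := by
  intro n
  induction n with
  | zero =>
    intro xs x hx
    have : xs = [] := List.eq_nil_of_length_eq_zero (Nat.le_zero.mp hx)
    subst this
    simp only [bSegs, gapsL, pvSegs, pvRun]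
    by_cases hc : min_length ≤ 1 <;> simp [hc]
  | succ n ih =>
    intro xs x hx
    have hg := gapsL_run xs x
    have hl := getLastD_run xs x
    match hr : (pvRun x xs).2 with
    | [] =>
      rw [hr] at hg hl
      simp only at hg hl
      have : pvSegs min_length (x :: xs)
          = (if (pvRun x xs).1 - x + 1 ≥ min_length then [(x, (pvRun x xs).1)] else []) := by
        simp [pvSegs, hr]
      rw [this]
      simp only [bSegs, hg, hl]
      by_cases hc : (pvRun x xs).1 - x + 1 ≥ min_length <;> simp [hc]
    | y :: ys =>
      rw [hr] at hg hl
      simp only at hg hl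
      have hlen : ys.length ≤ n := by
        have := pvRun_len x xs
        rw [hr] at this
        simp only [List.length_cons] at this
        omega
      have hps : pvSegs min_length (x :: xs)
          = (if (pvRun x xs).1 - x + 1 ≥ min_length then [(x, (pvRun x xs).1)] else [])
            ++ pvSegs min_length (y :: ys) := by
        simp [pvSegs, hr]
      rw [hps, ← ih ys y hlen]
      simp only [bSegs, hg, hl, List.map_cons, List.zip_cons_cons, List.filter_cons,
        List.cons_append]
      by_cases hc : (pvRun x xs).1 - x + 1 ≥ min_length <;> simp [hc]

theorem sorted_ne_nil (frames : List Int) (h : frames ≠ []) :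
    PySem.List.sorted frames (fun x => x) false ≠ [] := by
  intro hc
  apply h
  have := PySem.List.sorted_perm (xs := frames) (key := fun x : Int => x) (rev := false)
  rw [hc] at this
  exact (List.Perm.nil_eq this).symm

-- ===== VERDICT (by name: the statement is the Claim_ definition above) =====
theorem find_contiguous_segments_spec : Claim_equal_find_contiguous_segments := by
  intro frames min_length _
  unfold Spec_find_contiguous_segments find_contiguous_segments find_contiguous_segments_alt
  match hf : frames with
  | [] => simp [PySem.List.sorted]
  | a :: l =>
    have hne : PySem.List.sorted (a :: l) (fun x => x) false ≠ [] :=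
      sorted_ne_nil _ (by simp)
    match hs : PySem.List.sorted (a :: l) (fun x => x) false with
    | [] => exact absurd hs hne
    | f0 :: rest =>
      have h1 := aRun_eq_pvSegs min_length rest f0 f0
      have h2 : (if (pvRun f0 rest).1 - f0 + 1 ≥ min_length
            then [(f0, (pvRun f0 rest).1)] else [])
          ++ pvSegs min_length (pvRun f0 rest).2 = pvSegs min_length (f0 :: rest) := by
        simp [pvSegs]
      have h3 := bSegs_eq_pvSegs min_length rest.length rest f0 (Nat.le_refl _)
      exact (h1.trans h2).trans (h3.symm)
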